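-- pv_equiv track=rewrite | github.com/bkulyk/pyMailMergeService | pyMailMergeService.py | _sortparams
-- ===== SOURCE A (Python) =====
-- def _sortparams( params ):
--     """
--     The parameters need to be sorted a little bit; This fixed a problem I had
--     where the repeat section was repeating the section after the conent had
--     already been filled in, and therefore showing the wrong content.
--     Sort order is:
--         if, repeatsection, repeatcolumn, repeatrow, multiparagraph
--     """
--     other = []
--     modifiers = { 'if':[], 'repeatsection':[],'repeatcolumn':[],'repeatrow':[], 'multiparagraph':[], 'image':[] }
--     for key, value in params:
--         pipe   = key.find( r"|" )
--         colons = key.find( r"::" )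
--         if pipe > 0 and colons > 0 and pipe < colons :
--             #sorted.insert( 0, {key:value} )
--             for x in modifiers.keys():
--                 if key.find( x+"|" ) > -1:
--                     modifiers[x].append( {key:value} )
--         else:
--             other.append( {key:value} )
--     sorted = []
--     sorted.extend( modifiers['if'] )
--     sorted.extend( modifiers['repeatsection'] )
--     sorted.extend( modifiers['repeatcolumn'] )
--     sorted.extend( modifiers['repeatrow'] )
--     sorted.extend( modifiers['multiparagraph'] )
--     sorted.extend( modifiers['image'] )
--     sorted.extend( other )
--     return sorted
-- ===== SOURCE B (Python) =====
-- def _gate(key):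
--     pipe = key.find("|")
--     colons = key.find("::")
--     return pipe > 0 and colons > 0 and pipe < colons
--
--
-- def _sortparams(params):
--     order = ['if', 'repeatsection', 'repeatcolumn', 'repeatrow', 'multiparagraph', 'image']
--     result = [{k: v} for x in order
--               for k, v in params
--               if _gate(k) and k.find(x + '|') > -1]
--     result += [{k: v} for k, v in params if not _gate(k)]
--     return result
-- ===== Notes on version B (the rewrite author's own statement) =====
-- stated objective: alternative
-- what changed: Replaces the single pass that maintains six named bucket lists with repeated filtering passes: one scan of params per priority keyword (outer loop over the priority list) plus a final scan for non-modifier params, so no buckets are kept at all.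
import Mathlib
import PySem

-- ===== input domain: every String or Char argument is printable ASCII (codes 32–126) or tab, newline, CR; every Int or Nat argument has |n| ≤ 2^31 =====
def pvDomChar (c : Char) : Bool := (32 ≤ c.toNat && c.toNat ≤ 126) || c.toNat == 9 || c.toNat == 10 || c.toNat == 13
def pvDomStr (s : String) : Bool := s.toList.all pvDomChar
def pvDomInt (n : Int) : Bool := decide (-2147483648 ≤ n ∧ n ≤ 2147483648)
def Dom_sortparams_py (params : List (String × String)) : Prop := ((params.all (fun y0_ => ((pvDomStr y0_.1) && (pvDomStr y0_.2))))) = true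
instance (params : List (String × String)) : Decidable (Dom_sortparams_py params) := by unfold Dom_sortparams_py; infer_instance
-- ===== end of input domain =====

-- ===== PORT A =====
-- B changes the decomposition: one filtering scan per priority keyword instead of one pass over six bucket lists (objective: alternative).
def pvGateA (k : String) : Bool :=
  let pipe := PySem.Str.find k "|"
  let colons := PySem.Str.find k "::"
  decide (pipe > 0) && decide (colons > 0) && decide (pipe < colons)

def pvUpdA (k v : String) (x : String) (l : List (List (String × String))) : List (List (String × String)) :=
  if PySem.Str.find k (x ++ "|") > -1 then l ++ [[(k, v)]] else l

def pvStepA (st : List (List (String × String)) × List (List (String × String)) × List (List (String × String)) × List (List (String × String)) × List (List (String × String)) × List (List (String × String)) × List (List (String × String))) (p : String × String) :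
    List (List (String × String)) × List (List (String × String)) × List (List (String × String)) × List (List (String × String)) × List (List (String × String)) × List (List (String × String)) × List (List (String × String)) :=
  let (o, bi, brs, brc, brr, bmp, bim) := st
  if pvGateA p.1 then
    (o, pvUpdA p.1 p.2 "if" bi, pvUpdA p.1 p.2 "repeatsection" brs, pvUpdA p.1 p.2 "repeatcolumn" brc,
       pvUpdA p.1 p.2 "repeatrow" brr, pvUpdA p.1 p.2 "multiparagraph" bmp, pvUpdA p.1 p.2 "image" bim)
  else
    (o ++ [[(p.1, p.2)]], bi, brs, brc, brr, bmp, bim)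

def sortparams_py (params : List (String × String)) : List (List (String × String)) :=
  let st := params.foldl pvStepA ([], [], [], [], [], [], [])
  let (o, bi, brs, brc, brr, bmp, bim) := st
  bi ++ brs ++ brc ++ brr ++ bmp ++ bim ++ o

-- ===== PORT B =====
def pvGateB (k : String) : Bool :=
  let pipe := PySem.Str.find k "|"
  let colons := PySem.Str.find k "::"
  decide (pipe > 0) && decide (colons > 0) && decide (pipe < colons)

def sortparams_py_alt (params : List (String × String)) : List (List (String × String)) :=
  (["if", "repeatsection", "repeatcolumn", "repeatrow", "multiparagraph", "image"].flatMap
    (fun x => (params.filter (fun p => pvGateB p.1 && decide (PySem.Str.find p.1 (x ++ "|") > -1))).map (fun p => [p])))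
  ++ (params.filter (fun p => !pvGateB p.1)).map (fun p => [p])

-- ===== PRECONDITION & SPEC =====
def Spec_sortparams_py (params : List (String × String)) (out : List (List (String × String))) : Prop := out = sortparams_py_alt params
instance (params : List (String × String)) (out : List (List (String × String))) : Decidable (Spec_sortparams_py params out) := by unfold Spec_sortparams_py; infer_instance

-- ===== CLAIM (what is proved, stated in full; the proofs are below) =====
def Claim_equal_sortparams_py : Prop := ∀ (params : List (String × String)), Dom_sortparams_py params → Spec_sortparams_py params (sortparams_py params)

-- ===== LEMMAS AND PROOFS =====
def pvBkt (x : String) (ps : List (String × String)) : List (List (String × String)) :=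
  (ps.filter (fun p => pvGateB p.1 && decide (PySem.Str.find p.1 (x ++ "|") > -1))).map (fun p => [p])

def pvOth (ps : List (String × String)) : List (List (String × String)) :=
  (ps.filter (fun p => !pvGateB p.1)).map (fun p => [p])

lemma pvGateA_eq (k : String) : pvGateA k = pvGateB k := rfl

lemma pvFold_spec (ps : List (String × String)) :
    ∀ o bi brs brc brr bmp bim,
    ps.foldl pvStepA (o, bi, brs, brc, brr, bmp, bim) =
      (o ++ pvOth ps, bi ++ pvBkt "if" ps, brs ++ pvBkt "repeatsection" ps,
       brc ++ pvBkt "repeatcolumn" ps, brr ++ pvBkt "repeatrow" ps,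
       bmp ++ pvBkt "multiparagraph" ps, bim ++ pvBkt "image" ps) := by
  induction ps with
  | nil => intro o bi brs brc brr bmp bim; simp [pvOth, pvBkt]
  | cons p ps ih =>
    intro o bi brs brc brr bmp bim
    cases hg : pvGateB p.1 with
    | true =>
      simp only [List.foldl_cons, pvStepA, pvGateA_eq, hg, if_pos]
      rw [ih]
      simp only [Prod.mk.injEq]
      refine ⟨?_, ?_, ?_, ?_, ?_, ?_, ?_⟩ <;>
        simp only [pvOth, pvBkt, pvUpdA, List.filter_cons, hg, Bool.true_and,
          Bool.not_true, Bool.false_eq_true, if_false, decide_eq_true_eq] <;>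
        split <;> simp_all
    | false =>
      simp only [List.foldl_cons, pvStepA, pvGateA_eq, hg, Bool.false_eq_true, if_false]
      rw [ih]
      simp only [Prod.mk.injEq]
      refine ⟨?_, ?_, ?_, ?_, ?_, ?_, ?_⟩ <;>
        simp [pvOth, pvBkt, hg]

-- ===== VERDICT (by name: the statement is the Claim_ definition above) =====
theorem sortparams_py_spec : Claim_equal_sortparams_py := by
  intro params _
  unfold Spec_sortparams_py sortparams_py sortparams_py_alt
  rw [pvFold_spec]
  simp only [List.flatMap_cons, List.flatMap_nil, List.append_nil, List.nil_append]
  simp [pvBkt, pvOth, List.append_assoc]
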